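-- pv_equiv track=rewrite | github.com/sahilrider/Python-Codes | Interviewbit/Arrays/MaximumUnsortedSubarray.py | subUnsort
-- ===== SOURCE A (Python) =====
-- def subUnsort(A):
--     B = []
--     maxi=A[0]
--     for i in A:
--         if i>maxi:
--             maxi=i
--         B.append(maxi)
--
--     C = []
--     mini=A[-1]
--     for i in reversed(A):
--         if i<mini:
--             mini=i
--         C.append(mini)
--     C.reverse()
--     flag = 0
--     a,b = -1,-1
--     for i in range(len(A)):
--         if B[i]!=C[i]:
--             if flag==0:
--                 a=i
--                 flag=1
--             else:
--                 b=i
--     return [a,b] if a!=-1 or b!=-1 else [-1]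
-- ===== SOURCE B (Python) =====
-- def subUnsort(A):
--     # Constant extra space: one forward scan tracking the running max to find the
--     # last out-of-order index, one backward scan tracking the running min to
--     # find the first. (Return-value equivalent to the prefix-max/suffix-min
--     # array method; like it, raises IndexError on an empty list.)
--     n = len(A)
--     end = -1
--     maxi = A[0]
--     for i in range(n):
--         if A[i] < maxi:
--             end = i
--         else:
--             maxi = A[i]
--     if end == -1:
--         return [-1]
--     start = end
--     mini = A[-1]
--     for i in range(n - 1, -1, -1):
--         if A[i] > mini:
--             start = i
--         else:
--             mini = A[i]
--     return [start, end]
-- ===== Notes on version B (the rewrite author's own statement) =====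
-- stated objective: alternative
-- what changed: Instead of materializing a prefix-max array B and a suffix-min array C and scanning them for mismatches with a flag, B finds the last index whose value drops below the running maximum in one forward scan and the first index whose value exceeds the running minimum in one backward scan, using constant extra space and no third pass.
import Mathlib
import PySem

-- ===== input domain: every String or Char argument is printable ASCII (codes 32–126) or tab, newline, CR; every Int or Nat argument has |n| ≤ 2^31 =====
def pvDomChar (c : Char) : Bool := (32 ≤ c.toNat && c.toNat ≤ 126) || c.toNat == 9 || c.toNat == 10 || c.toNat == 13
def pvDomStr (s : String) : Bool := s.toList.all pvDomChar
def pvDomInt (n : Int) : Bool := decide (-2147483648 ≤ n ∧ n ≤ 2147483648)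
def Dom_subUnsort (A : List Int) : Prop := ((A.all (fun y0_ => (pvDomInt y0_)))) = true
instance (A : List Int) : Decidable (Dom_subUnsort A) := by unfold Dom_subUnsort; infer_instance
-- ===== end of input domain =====

-- B replaces A's two materialized prefix-max/suffix-min arrays and third marking pass by two
-- constant-extra-space scans (running max forward for the last bad index, running min backward for
-- the first); same return value on every non-empty list (both raise IndexError on []).


-- ===== PORT A =====
def subUnsort (A : List Int) : List Int :=
  -- first loop of A: running max appended into a list  (first/last element reads raise on empty input: excluded by Pre_)
  let s1 := A.foldl (fun (s : List Int × Int) i =>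
      let maxi := if i > s.2 then i else s.2
      (s.1 ++ [maxi], maxi)) ([], PySem.List.pyGetD A 0 0)
  let B := s1.1
  -- C = []; mini = A[-1]; for i in reversed(A): … ; C.reverse()
  let s2 := A.reverse.foldl (fun (s : List Int × Int) i =>
      let mini := if i < s.2 then i else s.2
      (s.1 ++ [mini], mini)) ([], PySem.List.pyGetD A (-1) 0)
  let C := s2.1.reverse
  -- flag = 0; a,b = -1,-1; for i in range(len(A)): …
  let s3 := (PySem.List.pyRange 0 (PySem.List.len A) 1).foldl
      (fun (st : Int × Int × Int) i =>
        if PySem.List.pyGetD B i 0 ≠ PySem.List.pyGetD C i 0 then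
          if st.1 = 0 then (1, i, st.2.2) else (st.1, st.2.1, i)
        else st) (0, -1, -1)
  if s3.2.1 ≠ -1 ∨ s3.2.2 ≠ -1 then [s3.2.1, s3.2.2] else [-1]

-- ===== PORT B =====
def subUnsort_alt (A : List Int) : List Int :=
  let n : Int := PySem.List.len A
  -- end = -1; maxi = A[0]; for i in range(n): if A[i] < maxi: end = i else: maxi = A[i]
  let s1 := (PySem.List.pyRange 0 n 1).foldl
      (fun (s : Int × Int) i =>
        if PySem.List.pyGetD A i 0 < s.2 then (i, s.2) else (s.1, PySem.List.pyGetD A i 0))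
      (-1, PySem.List.pyGetD A 0 0)
  if s1.1 = -1 then [-1]
  else
    -- start = end; mini = A[-1]; for i in range(n-1, -1, -1): if A[i] > mini: start = i else: mini = A[i]
    let s2 := (PySem.List.pyRange (n - 1) (-1) (-1)).foldl
        (fun (s : Int × Int) i =>
          if PySem.List.pyGetD A i 0 > s.2 then (i, s.2) else (s.1, PySem.List.pyGetD A i 0))
        (s1.1, PySem.List.pyGetD A (-1) 0)
    [s2.1, s1.1]

-- ===== PRECONDITION & SPEC =====
-- Pre_ excludes only the empty list, on which A (and B alike) raises IndexError reading the first element.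
def Pre_subUnsort (A : List Int) : Prop := A ≠ []
instance (A : List Int) : Decidable (Pre_subUnsort A) := by unfold Pre_subUnsort; infer_instance
def pvWitness_subUnsort : List Int := [1, 3, 2, 4]
def Spec_subUnsort (A : List Int) (out : List Int) : Prop := out = subUnsort_alt A
instance (A : List Int) (out : List Int) : Decidable (Spec_subUnsort A out) := by unfold Spec_subUnsort; infer_instance

-- ===== CLAIM (what is proved, stated in full; the proofs are below) =====
def Claim_equal_subUnsort : Prop := ∀ (A : List Int), Dom_subUnsort A → Pre_subUnsort A → Spec_subUnsort A (subUnsort A)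

-- ===== LEMMAS AND PROOFS =====

-- value of A at a Nat index (0 for out of range; only used at indices < A.length)
def pvVal (A : List Int) (k : Nat) : Int := A.getD k 0
-- max of A[0..k] (seeded with A[0])
def pvPM (A : List Int) (k : Nat) : Int := (A.take (k + 1)).foldl max (pvVal A 0)
-- min of A[k..] (seeded with A[k])
def pvSM (A : List Int) (k : Nat) : Int := (A.drop k).foldl min (pvVal A k)
-- the three index sets, as ascending lists
def pvSl (A : List Int) : List Nat := (List.range A.length).filter (fun k => pvPM A k ≠ pvSM A k)
def pvEl (A : List Int) : List Nat := (List.range A.length).filter (fun k => pvVal A k < pvPM A k)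
def pvFl (A : List Int) : List Nat := (List.range A.length).filter (fun k => pvSM A k < pvVal A k)

-- ---- generic foldl-min/max facts ----
theorem foldl_min_min (l : List Int) : ∀ a b : Int, l.foldl min (min a b) = min a (l.foldl min b) := by
  induction l with
  | nil => intro a b; rfl
  | cons x t ih =>
    intro a b
    simp only [List.foldl_cons]
    rw [min_assoc, ih]

theorem foldl_min_seed_mem (l : List Int) (a : Int) (ha : a ∈ l) (b : Int) :
    l.foldl min b = min b (l.foldl min a) := by
  induction l generalizing b with
  | nil => cases ha
  | cons x t ih =>
    simp only [List.foldl_cons]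
    rcases List.mem_cons.mp ha with rfl | ha'
    · rw [min_self, foldl_min_min]
    · rw [ih ha' (min b x), ih ha' (min a x)]
      have hY : t.foldl min a ≤ a := (PySem.List.foldl_min_le t a).1
      simp only [min_def]
      split_ifs <;> omega
      
theorem foldl_min_seed_eq (l : List Int) (a b : Int) (ha : a ∈ l) (hb : b ∈ l) :
    l.foldl min a = l.foldl min b := by
  rw [foldl_min_seed_mem l b hb a]
  have := (PySem.List.foldl_min_le l b).2 a ha
  omega

theorem foldl_min_reverse (l : List Int) (b : Int) : l.reverse.foldl min b = l.foldl min b :=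
  List.Perm.foldl_eq (rcomm := ⟨fun b a a' => by omega⟩) (List.reverse_perm l) b

-- ---- pm / sm basic facts (n = A.length) ----
theorem pvVal_le_pvPM (A : List Int) (k : Nat) (hk : k < A.length) : pvVal A k ≤ pvPM A k := by
  have hmem : pvVal A k ∈ A.take (k + 1) := by
    have : (A.take (k + 1))[k]'(by simp; omega) = A[k]'hk := List.getElem_take
    have h2 : A[k]'hk = pvVal A k := by simp [pvVal, List.getD_eq_getElem?_getD, hk]
    rw [h2] at this
    exact this ▸ List.getElem_mem _
  exact ((PySem.List.le_foldl_max (A.take (k+1)) (pvVal A 0)).2 _ hmem)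

theorem pvSM_le_pvVal (A : List Int) (k : Nat) : pvSM A k ≤ pvVal A k :=
  (PySem.List.foldl_min_le _ _).1

theorem pvPM_mono (A : List Int) (i j : Nat) (hij : i ≤ j) : pvPM A i ≤ pvPM A j := by
  have : A.take (j + 1) = A.take (i + 1) ++ (A.drop (i + 1)).take (j - i) := by
    rw [← List.take_add]; congr 1; omega
  unfold pvPM
  rw [this, List.foldl_append]
  exact (PySem.List.le_foldl_max _ _).1

theorem pvSM_mono (A : List Int) (i j : Nat) (hij : i ≤ j) (hj : j < A.length) :
    pvSM A i ≤ pvSM A j := by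
  have hvj : pvVal A j ∈ A.drop i := by
    have h1 : (A.drop i)[j - i]'(by simp; omega) = A[i + (j - i)]'(by omega) := List.getElem_drop
    have h2 : A[i + (j - i)]'(by omega) = pvVal A j := by
      simp [pvVal, List.getD_eq_getElem?_getD, hj]
      congr 1; omega
    exact h2 ▸ h1 ▸ List.getElem_mem _
  have hsub : A.drop j ⊆ A.drop i := by
    have : A.drop j = (A.drop i).drop (j - i) := by rw [List.drop_drop]; congr 1; omega
    rw [this]; exact List.drop_subset _ _
  unfold pvSM
  rcases PySem.List.foldl_min_mem (A.drop j) (pvVal A j) with h | h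
  · rw [h]; exact (PySem.List.foldl_min_le _ _).2 _ hvj
  · exact (PySem.List.foldl_min_le _ _).2 _ (hsub h)

theorem pvPM_attain (A : List Int) (k : Nat) : ∃ j ≤ k, pvPM A k = pvVal A j := by
  unfold pvPM
  rcases PySem.List.foldl_max_mem (A.take (k + 1)) (pvVal A 0) with h | h
  · exact ⟨0, Nat.zero_le _, h⟩
  · rcases List.mem_iff_getElem.mp h with ⟨j, hj, hval⟩
    refine ⟨j, by simp at hj; omega, ?_⟩
    rw [← hval, List.getElem_take]
    have hjA : j < A.length := by have := hj; simp at this; omega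
    simp [pvVal, List.getD_eq_getElem?_getD, hjA]

theorem pvSM_attain (A : List Int) (k : Nat) (hk : k < A.length) :
    ∃ j, k ≤ j ∧ j < A.length ∧ pvSM A k = pvVal A j := by
  unfold pvSM
  rcases PySem.List.foldl_min_mem (A.drop k) (pvVal A k) with h | h
  · exact ⟨k, le_refl _, hk, h⟩
  · rcases List.mem_iff_getElem.mp h with ⟨j, hj, hval⟩
    have hjA : k + j < A.length := by simp at hj; omega
    refine ⟨k + j, by simp at hj; omega, hjA, ?_⟩
    rw [← hval, List.getElem_drop]
    simp [pvVal, List.getD_eq_getElem?_getD, hjA]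

-- mismatch at k ↔ k is out of order on the left or on the right
theorem cond_iff (A : List Int) (k : Nat) (hk : k < A.length) :
    (pvPM A k ≠ pvSM A k) ↔ (pvVal A k < pvPM A k ∨ pvSM A k < pvVal A k) := by
  have h1 := pvVal_le_pvPM A k hk
  have h2 := pvSM_le_pvVal A k
  omega

theorem val_mem_drop (A : List Int) (i j : Nat) (hij : i ≤ j) (hj : j < A.length) :
    pvVal A j ∈ A.drop i := by
  have h1 : (A.drop i)[j - i]'(by simp; omega) = A[i + (j - i)]'(by omega) := List.getElem_drop
  have h2 : A[i + (j - i)]'(by omega) = pvVal A j := by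
    simp [pvVal, List.getD_eq_getElem?_getD, hj]
    congr 1; omega
  exact h2 ▸ h1 ▸ List.getElem_mem _

theorem getElem_eq_pvVal (A : List Int) (j : Nat) (hj : j < A.length) :
    A[j]'hj = pvVal A j := by
  simp [pvVal, List.getD_eq_getElem?_getD, hj]

theorem take_succ_concat (A : List Int) (j : Nat) (hj : j < A.length) :
    A.take (j + 1) = A.take j ++ [pvVal A j] := by
  rw [List.take_add_one]
  simp [hj, getElem_eq_pvVal]

theorem drop_eq_val_cons (A : List Int) (j : Nat) (hj : j < A.length) :
    A.drop j = pvVal A j :: A.drop (j + 1) := by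
  rw [List.drop_eq_getElem_cons hj, getElem_eq_pvVal]

theorem pvPM_succ' (A : List Int) (k : Nat) (hk : k < A.length) :
    (A.take (k + 1)).foldl max (pvVal A 0) = max ((A.take k).foldl max (pvVal A 0)) (pvVal A k) := by
  rw [take_succ_concat A k hk, List.foldl_append]
  rfl

theorem sm'_succ (A : List Int) (c : Int) (k : Nat) (hk : k < A.length) :
    (A.drop k).foldl min c = min (pvVal A k) ((A.drop (k + 1)).foldl min c) := by
  rw [drop_eq_val_cons A k hk]
  simp only [List.foldl_cons]
  rw [min_comm c, foldl_min_min]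

theorem pvSM_eq_sm' (A : List Int) (_h : A ≠ []) (k : Nat) (hk : k < A.length) :
    pvSM A k = (A.drop k).foldl min (pvVal A (A.length - 1)) := by
  unfold pvSM
  exact foldl_min_seed_eq _ _ _ (val_mem_drop A k k (le_refl _) hk)
    (val_mem_drop A k (A.length - 1) (by omega) (by omega))

-- ---- the two key exchange lemmas ----
theorem condF_to_condE (A : List Int) (k : Nat) (hk : k < A.length)
    (h : pvSM A k < pvVal A k) : ∃ j, k < j ∧ j < A.length ∧ pvVal A j < pvPM A j := by
  rcases pvSM_attain A k hk with ⟨j, hkj, hj, hval⟩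
  have hne : j ≠ k := by intro e; rw [e] at hval; omega
  refine ⟨j, by omega, hj, ?_⟩
  have := pvVal_le_pvPM A k hk
  have := pvPM_mono A k j hkj
  omega

theorem condE_to_condF (A : List Int) (k : Nat) (hk : k < A.length)
    (h : pvVal A k < pvPM A k) : ∃ j, j < k ∧ pvSM A j < pvVal A j := by
  rcases pvPM_attain A k with ⟨j, hjk, hval⟩
  have hne : j ≠ k := by intro e; rw [e] at hval; omega
  refine ⟨j, by omega, ?_⟩
  have := pvSM_le_pvVal A k
  have := pvSM_mono A j k hjk hk
  omega

-- ---- sorted-filter utilities ----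
theorem filt_sorted (n : Nat) (p : Nat → Bool) : ((List.range n).filter p).Pairwise (· < ·) :=
  (List.pairwise_lt_range).filter p

theorem getLastD_mem (l : List Nat) (h : l ≠ []) : l.getLastD 0 ∈ l := by
  rw [List.getLastD_eq_getLast?, List.getLast?_eq_some_getLast h]
  exact List.getLast_mem h

theorem headD_mem (l : List Nat) (h : l ≠ []) : l.headD 0 ∈ l := by
  cases l with
  | nil => exact absurd rfl h
  | cons x t => exact List.mem_cons_self

theorem le_getLastD_of_sorted (l : List Nat) (hs : l.Pairwise (· < ·)) (x : Nat) (hx : x ∈ l) :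
    x ≤ l.getLastD 0 := by
  induction l with
  | nil => cases hx
  | cons y t ih =>
    rcases List.mem_cons.mp hx with rfl | hx'
    · cases t with
      | nil => simp
      | cons z s =>
        have : x < (z :: s).getLastD 0 := (List.pairwise_cons.mp hs).1 _ (getLastD_mem _ (by simp))
        simpa using this.le
    · have := ih (List.pairwise_cons.mp hs).2 hx'
      cases t with
      | nil => cases hx'
      | cons z s => simpa using this

theorem headD_le_of_sorted (l : List Nat) (hs : l.Pairwise (· < ·)) (x : Nat) (hx : x ∈ l) :
    l.headD 0 ≤ x := by
  cases l with
  | nil => cases hx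
  | cons y t =>
    rcases List.mem_cons.mp hx with rfl | hx'
    · simp
    · exact ((List.pairwise_cons.mp hs).1 _ hx').le

theorem pvSl_sorted (A : List Int) : (pvSl A).Pairwise (· < ·) := by
  unfold pvSl; exact filt_sorted _ _

theorem pvEl_sorted (A : List Int) : (pvEl A).Pairwise (· < ·) := by
  unfold pvEl; exact filt_sorted _ _

theorem pvFl_sorted (A : List Int) : (pvFl A).Pairwise (· < ·) := by
  unfold pvFl; exact filt_sorted _ _

theorem mem_pvSl (A : List Int) (k : Nat) : k ∈ pvSl A ↔ k < A.length ∧ pvPM A k ≠ pvSM A k := by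
  simp [pvSl, List.mem_filter]

theorem mem_pvEl (A : List Int) (k : Nat) : k ∈ pvEl A ↔ k < A.length ∧ pvVal A k < pvPM A k := by
  simp [pvEl, List.mem_filter]

theorem mem_pvFl (A : List Int) (k : Nat) : k ∈ pvFl A ↔ k < A.length ∧ pvSM A k < pvVal A k := by
  simp [pvFl, List.mem_filter]

-- the last mismatch is out of order on the left
theorem last_Sl_in_El (A : List Int) (h : pvSl A ≠ []) : (pvSl A).getLastD 0 ∈ pvEl A := by
  set M := (pvSl A).getLastD 0 with hM
  have hmem : M ∈ pvSl A := getLastD_mem _ h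
  have ⟨hMn, hMne⟩ := (mem_pvSl A M).mp hmem
  rcases (cond_iff A M hMn).mp hMne with hE | hF
  · exact (mem_pvEl A M).mpr ⟨hMn, hE⟩
  · exfalso
    rcases condF_to_condE A M hMn hF with ⟨j, hMj, hj, hEj⟩
    have hjS : j ∈ pvSl A := (mem_pvSl A j).mpr ⟨hj, (cond_iff A j hj).mpr (Or.inl hEj)⟩
    have := le_getLastD_of_sorted _ (pvSl_sorted A) j hjS
    omega

-- the first mismatch is out of order on the right
theorem head_Sl_in_Fl (A : List Int) (h : pvSl A ≠ []) : (pvSl A).headD 0 ∈ pvFl A := by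
  set m := (pvSl A).headD 0 with hm
  have hmem : m ∈ pvSl A := headD_mem _ h
  have ⟨hmn, hmne⟩ := (mem_pvSl A m).mp hmem
  rcases (cond_iff A m hmn).mp hmne with hE | hF
  · exfalso
    rcases condE_to_condF A m hmn hE with ⟨j, hjm, hFj⟩
    have hjS : j ∈ pvSl A := (mem_pvSl A j).mpr
      ⟨by omega, (cond_iff A j (by omega)).mpr (Or.inr hFj)⟩
    have := headD_le_of_sorted _ (pvSl_sorted A) j hjS
    omega
  · exact (mem_pvFl A m).mpr ⟨hmn, hF⟩

theorem head_lt_last_Sl (A : List Int) (h : pvSl A ≠ []) :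
    (pvSl A).headD 0 < (pvSl A).getLastD 0 := by
  have hF := head_Sl_in_Fl A h
  have ⟨hmn, hFm⟩ := (mem_pvFl A _).mp hF
  rcases condF_to_condE A _ hmn hFm with ⟨j, hmj, hj, hEj⟩
  have hjS : j ∈ pvSl A := (mem_pvSl A j).mpr ⟨hj, (cond_iff A j hj).mpr (Or.inl hEj)⟩
  have := le_getLastD_of_sorted _ (pvSl_sorted A) j hjS
  omega

theorem El_nonempty_iff (A : List Int) : pvEl A ≠ [] ↔ pvSl A ≠ [] := by
  constructor
  · intro h hS
    have hmem := headD_mem _ h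
    have ⟨hn, hE⟩ := (mem_pvEl A _).mp hmem
    have : (pvEl A).headD 0 ∈ pvSl A := (mem_pvSl A _).mpr ⟨hn, (cond_iff A _ hn).mpr (Or.inl hE)⟩
    rw [hS] at this; cases this
  · intro h hE
    have := last_Sl_in_El A h
    rw [hE] at this; cases this

theorem last_El_eq_last_Sl (A : List Int) (h : pvSl A ≠ []) :
    (pvEl A).getLastD 0 = (pvSl A).getLastD 0 := by
  have hEne : pvEl A ≠ [] := (El_nonempty_iff A).mpr h
  have h1 : (pvSl A).getLastD 0 ≤ (pvEl A).getLastD 0 :=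
    le_getLastD_of_sorted _ (pvEl_sorted A) _ (last_Sl_in_El A h)
  have hmem := getLastD_mem _ hEne
  have ⟨hn, hE⟩ := (mem_pvEl A _).mp hmem
  have h2 : (pvEl A).getLastD 0 ≤ (pvSl A).getLastD 0 :=
    le_getLastD_of_sorted _ (pvSl_sorted A) _
      ((mem_pvSl A _).mpr ⟨hn, (cond_iff A _ hn).mpr (Or.inl hE)⟩)
  omega

theorem Fl_nonempty (A : List Int) (h : pvSl A ≠ []) : pvFl A ≠ [] := by
  intro hF
  have := head_Sl_in_Fl A h
  rw [hF] at this; cases this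

theorem head_Fl_eq_head_Sl (A : List Int) (h : pvSl A ≠ []) :
    (pvFl A).headD 0 = (pvSl A).headD 0 := by
  have hFne := Fl_nonempty A h
  have h1 : (pvFl A).headD 0 ≤ (pvSl A).headD 0 :=
    headD_le_of_sorted _ (pvFl_sorted A) _ (head_Sl_in_Fl A h)
  have hmem := headD_mem _ hFne
  have ⟨hn, hF⟩ := (mem_pvFl A _).mp hmem
  have h2 : (pvSl A).headD 0 ≤ (pvFl A).headD 0 :=
    headD_le_of_sorted _ (pvSl_sorted A) _
      ((mem_pvSl A _).mpr ⟨hn, (cond_iff A _ hn).mpr (Or.inr hF)⟩)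
  omega

-- ---- port characterizations ----
theorem foldA1max : ∀ (xs acc : List Int) (m : Int),
    xs.foldl (fun (s : List Int × Int) i =>
        let maxi := if i > s.2 then i else s.2
        (s.1 ++ [maxi], maxi)) (acc, m)
    = (acc ++ (List.range xs.length).map (fun k => (xs.take (k + 1)).foldl max m),
       xs.foldl max m) := by
  intro xs
  induction xs with
  | nil => intro acc m; simp
  | cons x t ih =>
    intro acc m
    have hmax : (if x > m then x else m) = max m x := by rw [max_def]; split_ifs <;> omega
    simp only [List.foldl_cons, hmax]
    rw [ih]
    simp only [List.length_cons, List.range_succ_eq_map, List.map_cons, List.map_map]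
    apply Prod.ext <;> simp [List.append_assoc, Function.comp_def]

theorem foldA1min : ∀ (xs acc : List Int) (m : Int),
    xs.foldl (fun (s : List Int × Int) i =>
        let mini := if i < s.2 then i else s.2
        (s.1 ++ [mini], mini)) (acc, m)
    = (acc ++ (List.range xs.length).map (fun k => (xs.take (k + 1)).foldl min m),
       xs.foldl min m) := by
  intro xs
  induction xs with
  | nil => intro acc m; simp
  | cons x t ih =>
    intro acc m
    have hmin : (if x < m then x else m) = min m x := by rw [min_def]; split_ifs <;> omega
    simp only [List.foldl_cons, hmin]
    rw [ih]
    simp only [List.length_cons, List.range_succ_eq_map, List.map_cons, List.map_map]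
    apply Prod.ext <;> simp [List.append_assoc, Function.comp_def]

theorem getLastD_irrel (l : List Nat) (h : l ≠ []) (d1 d2 : Nat) :
    l.getLastD d1 = l.getLastD d2 := by
  rw [List.getLastD_eq_getLast?, List.getLastD_eq_getLast?, List.getLast?_eq_some_getLast h]
  rfl

theorem flagFold_one : ∀ (xs : List Nat) (a b : Int),
    xs.foldl (fun (st : Int × Int × Int) (k : Nat) =>
        if st.1 = 0 then ((1 : Int), (k : Int), st.2.2) else (st.1, st.2.1, (k : Int)))
      (1, a, b)
    = (1, a, if xs = [] then b else ((xs.getLastD 0 : Nat) : Int)) := by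
  intro xs
  induction xs with
  | nil => intro a b; rfl
  | cons x t ih =>
    intro a b
    simp only [List.foldl_cons, if_neg (by norm_num : ¬ (1 : Int) = 0)]
    rw [ih]
    by_cases ht : t = []
    · subst ht; simp
    · simp only [if_neg ht, if_neg (List.cons_ne_nil x t), List.getLastD_cons]
      rw [getLastD_irrel t ht x 0]

theorem flagFold (l : List Nat) :
    l.foldl (fun (st : Int × Int × Int) (k : Nat) =>
        if st.1 = 0 then ((1 : Int), (k : Int), st.2.2) else (st.1, st.2.1, (k : Int)))
      (0, -1, -1)
    = (match l with
       | [] => ((0 : Int), (-1 : Int), (-1 : Int))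
       | x :: xs => (1, (x : Int), if xs = [] then (-1 : Int) else ((xs.getLastD 0 : Nat) : Int))) := by
  cases l with
  | nil => rfl
  | cons x xs =>
    simp only [List.foldl_cons, reduceIte]
    exact flagFold_one xs x (-1)

theorem B_getD (A : List Int) (k : Nat) (hk : k < A.length) :
    (((List.range A.length).map (fun j => (A.take (j + 1)).foldl max (pvVal A 0))).getD k 0)
      = pvPM A k :=
  PySem.List.getD_map_range _ _ _ _ hk

theorem C_getD (A : List Int) (h : A ≠ []) (k : Nat) (hk : k < A.length) :
    ((((List.range A.length).map
        (fun j => (A.reverse.take (j + 1)).foldl min (pvVal A (A.length - 1)))).reverse).getD k 0)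
      = pvSM A k := by
  set L := (List.range A.length).map
      (fun j => (A.reverse.take (j + 1)).foldl min (pvVal A (A.length - 1))) with hL
  have hlen : L.length = A.length := by simp [hL]
  have hkL : k < L.reverse.length := by simp [hlen, hk]
  have hkL2 : k < L.length := by rw [← List.length_reverse]; exact hkL
  rw [List.getD_eq_getElem L.reverse 0 hkL, List.getElem_reverse]
  have hgetm : L[L.length - 1 - k]'(by rw [hlen]; omega) =
      (A.reverse.take ((L.length - 1 - k) + 1)).foldl min (pvVal A (A.length - 1)) := by
    simp only [hL, List.getElem_map, List.getElem_range]
  rw [hgetm, show (L.length - 1 - k) + 1 = A.length - k by rw [hlen]; omega]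
  rw [show A.reverse.take (A.length - k) = (A.drop k).reverse by
    rw [List.take_reverse, show A.length - (A.length - k) = k by omega]]
  rw [foldl_min_reverse]
  exact (pvSM_eq_sm' A h k hk).symm

theorem pyGetD_zero (A : List Int) : PySem.List.pyGetD A 0 0 = pvVal A 0 := by
  rw [PySem.List.pyGetD_of_nonneg A 0 (by norm_num)]; rfl

theorem pyGetD_neg_one (A : List Int) (h : A ≠ []) :
    PySem.List.pyGetD A (-1) 0 = pvVal A (A.length - 1) := by
  unfold PySem.List.pyGetD
  rw [PySem.List.pyGet?_neg_one, List.getLast?_eq_some_getLast h]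
  have hn : A.length - 1 < A.length := by
    cases A with | nil => exact absurd rfl h | cons x t => simp
  rw [List.getLast_eq_getElem, getElem_eq_pvVal A _ hn]
  rfl

theorem portA_eq (A : List Int) (h : A ≠ []) :
    subUnsort A = match pvSl A with
      | [] => [-1]
      | [x] => [(x : Int), -1]
      | x :: xs => [(x : Int), ((xs.getLastD 0 : Nat) : Int)] := by
  have hn0 : 0 < A.length := List.length_pos_iff.mpr h
  unfold subUnsort
  rw [pyGetD_zero, pyGetD_neg_one A h, foldA1max, foldA1min]
  simp only [List.nil_append, List.length_reverse]
  rw [show PySem.List.len A = ((A.length : Int)) from rfl, PySem.List.pyRange_zero_natCast,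
    List.foldl_map]
  simp only [PySem.List.pyGetD_natCast]
  rw [PySem.List.foldl_ite_eq_foldl_filter
    (p := fun k : Nat =>
      ¬ ((((List.range A.length).map (fun j => (A.take (j + 1)).foldl max (pvVal A 0))).getD k 0)
        = ((((List.range A.length).map (fun j =>
            (A.reverse.take (j + 1)).foldl min (pvVal A (A.length - 1)))).reverse).getD k 0)))]
  have hfc : (List.range A.length).filter (fun k =>
      decide ¬ ((((List.range A.length).map (fun j => (A.take (j + 1)).foldl max (pvVal A 0))).getD k 0)
        = ((((List.range A.length).map (fun j =>
            (A.reverse.take (j + 1)).foldl min (pvVal A (A.length - 1)))).reverse).getD k 0)))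
      = pvSl A := by
    unfold pvSl
    apply List.filter_congr
    intro k hk
    have hklt : k < A.length := List.mem_range.mp hk
    rw [B_getD A k hklt, C_getD A h k hklt]
  rw [hfc, flagFold (pvSl A)]
  cases hS : pvSl A with
  | nil => norm_num
  | cons x xs =>
    have hx : (x : Int) ≠ -1 := by omega
    simp only []
    rw [if_pos (Or.inl hx)]
    cases xs with
    | nil => simp
    | cons y ys => simp [List.cons_ne_nil]

theorem bfold1 (A : List Int) : ∀ (j : Nat), j ≤ A.length →
    (List.range j).foldl (fun (s : Int × Int) (k : Nat) =>
        if A.getD k 0 < s.2 then ((k : Int), s.2) else (s.1, A.getD k 0)) (-1, pvVal A 0)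
    = ((((List.range j).filter (fun k => pvVal A k < pvPM A k)).map (fun k : Nat => (k : Int))).getLastD (-1),
       (A.take j).foldl max (pvVal A 0)) := by
  intro j
  induction j with
  | zero => intro _; simp
  | succ j ih =>
    intro hj
    have hjn : j < A.length := by omega
    rw [List.range_succ, List.foldl_append, ih (by omega), List.filter_append]
    simp only [List.foldl_cons, List.foldl_nil, List.filter_cons, List.filter_nil]
    have hgd : A.getD j 0 = pvVal A j := rfl
    have hPM : pvPM A j = max ((A.take j).foldl max (pvVal A 0)) (pvVal A j) := pvPM_succ' A j hjn
    have hiff : (pvVal A j < pvPM A j) ↔ (A.getD j 0 < (A.take j).foldl max (pvVal A 0)) := by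
      rw [hgd, hPM, lt_max_iff]
      omega
    by_cases hc : pvVal A j < pvPM A j
    · rw [if_pos (hiff.mp hc), if_pos (by exact decide_eq_true hc)]
      rw [take_succ_concat A j hjn, List.foldl_append]
      refine Prod.ext ?_ ?_
      · simp
      · simp only [List.foldl_cons, List.foldl_nil]
        rw [hPM] at hc
        rw [max_def]
        split_ifs <;> omega
    · rw [if_neg (fun hlt => hc (hiff.mpr hlt)), if_neg (by simpa using hc)]
      rw [take_succ_concat A j hjn, List.foldl_append]
      refine Prod.ext ?_ ?_
      · simp
      · simp only [List.foldl_cons, List.foldl_nil]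
        rw [hPM] at hc
        rw [max_def]
        split_ifs <;> omega

theorem bfold2 (A : List Int) (h : A ≠ []) : ∀ (d j : Nat), j + d = A.length → ∀ e : Int,
    ((List.range' j d).reverse).foldl (fun (s : Int × Int) (k : Nat) =>
        if A.getD k 0 > s.2 then ((k : Int), s.2) else (s.1, A.getD k 0))
      (e, pvVal A (A.length - 1))
    = ((((List.range' j d).filter (fun k => pvSM A k < pvVal A k)).map (fun k : Nat => (k : Int))).headD e,
       (A.drop j).foldl min (pvVal A (A.length - 1))) := by
  intro d
  induction d with
  | zero =>
    intro j hj e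
    rw [show j = A.length by omega]
    simp [List.drop_length]
  | succ d ih =>
    intro j hj e
    have hjn : j < A.length := by omega
    rw [List.range'_succ, List.reverse_cons, List.foldl_append, ih (j + 1) (by omega) e]
    simp only [List.foldl_cons, List.foldl_nil, List.filter_cons]
    have hgd : A.getD j 0 = pvVal A j := rfl
    have hsm' : (A.drop j).foldl min (pvVal A (A.length - 1))
        = min (pvVal A j) ((A.drop (j + 1)).foldl min (pvVal A (A.length - 1))) :=
      sm'_succ A _ j hjn
    have hSM : pvSM A j = min (pvVal A j) ((A.drop (j + 1)).foldl min (pvVal A (A.length - 1))) := by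
      rw [pvSM_eq_sm' A h j hjn]; exact hsm'
    have hiff : (pvSM A j < pvVal A j) ↔
        (A.getD j 0 > (A.drop (j + 1)).foldl min (pvVal A (A.length - 1))) := by
      rw [hgd, hSM, min_lt_iff]
      omega
    by_cases hc : pvSM A j < pvVal A j
    · rw [if_pos (hiff.mp hc), if_pos (by exact decide_eq_true hc)]
      refine Prod.ext ?_ ?_
      · simp
      · rw [hsm', min_def]
        have := hiff.mp hc
        split_ifs <;> omega
    · rw [if_neg (fun hlt => hc (hiff.mpr hlt)), if_neg (by simpa using hc)]
      refine Prod.ext ?_ ?_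
      · simp
      · rw [hsm', min_def]
        have : ¬ (A.getD j 0 > (A.drop (j + 1)).foldl min (pvVal A (A.length - 1))) :=
          fun hlt => hc (hiff.mpr hlt)
        split_ifs <;> omega

theorem mapCast_getLastD (l : List Nat) (hne : l ≠ []) (d : Int) :
    (l.map (fun k : Nat => (k : Int))).getLastD d = ((l.getLastD 0 : Nat) : Int) := by
  rw [List.getLastD_eq_getLast?, List.getLastD_eq_getLast?, List.getLast?_map,
    List.getLast?_eq_some_getLast hne]
  rfl

theorem portB_eq (A : List Int) (h : A ≠ []) :
    subUnsort_alt A = if pvEl A = [] then [-1]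
      else [((pvFl A).map (Nat.cast)).headD (((pvEl A).getLastD 0 : Nat) : Int),
            ((pvEl A).getLastD 0 : Nat)] := by
  have hn0 : 0 < A.length := List.length_pos_iff.mpr h
  simp only [subUnsort_alt, PySem.List.len]
  rw [pyGetD_zero, pyGetD_neg_one A h]
  rw [PySem.List.pyRange_zero_natCast, List.foldl_map]
  simp only [PySem.List.pyGetD_natCast]
  rw [bfold1 A A.length (le_refl _)]
  have hEl : (List.range A.length).filter (fun k => pvVal A k < pvPM A k) = pvEl A := rfl
  rw [hEl]
  by_cases hE : pvEl A = []
  · rw [if_pos (by rw [hE]; rfl), if_pos hE]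
  · have hlast : ((pvEl A).map (fun k : Nat => (k : Int))).getLastD (-1)
        = (((pvEl A).getLastD 0 : Nat) : Int) := mapCast_getLastD _ hE _
    rw [hlast]
    rw [if_neg (by omega), if_neg hE]
    rw [show ((A.length : Int) - 1) = (((A.length - 1 : Nat) : Int)) by omega]
    rw [PySem.List.pyRange_neg_one_eq_reverse]
    rw [show (((A.length - 1 : Nat) : Int) + 1) = ((A.length : Int)) by omega]
    rw [show ((-1 : Int) + 1) = (0 : Int) by norm_num]
    rw [PySem.List.pyRange_zero_natCast, ← List.map_reverse, List.foldl_map]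
    simp only [PySem.List.pyGetD_natCast]
    rw [List.range_eq_range', bfold2 A h A.length 0 (by omega)]
    rw [← List.range_eq_range']
    rfl

-- ===== VERDICT (by name: the statement is the Claim_ definition above) =====
theorem subUnsort_spec : Claim_equal_subUnsort := by
  intro A _hdom hpre
  unfold Spec_subUnsort
  rw [portA_eq A hpre, portB_eq A hpre]
  by_cases hS : pvSl A = []
  · rw [hS]
    have hE : pvEl A = [] := by
      by_contra hE; exact (El_nonempty_iff A).mp hE hS
    simp [hE]
  · have hE : pvEl A ≠ [] := (El_nonempty_iff A).mpr hS
    have hlt := head_lt_last_Sl A hS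
    obtain ⟨x, xs, hxs⟩ := List.exists_cons_of_ne_nil hS
    have hxsne : xs ≠ [] := by
      intro e; rw [hxs, e] at hlt; simp at hlt
    obtain ⟨y, ys, hys⟩ := List.exists_cons_of_ne_nil hxsne
    rw [hxs, hys]
    simp only [if_neg hE]
    have hlast : (pvEl A).getLastD 0 = (pvSl A).getLastD 0 := last_El_eq_last_Sl A hS
    have hheadF : (pvFl A).headD 0 = (pvSl A).headD 0 := head_Fl_eq_head_Sl A hS
    have hFne := Fl_nonempty A hS
    obtain ⟨z, zs, hzs⟩ := List.exists_cons_of_ne_nil hFne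
    have hmap : ((pvFl A).map (Nat.cast (R := Int))).headD (((pvEl A).getLastD 0 : Nat) : Int)
        = ((pvFl A).headD 0 : Nat) := by rw [hzs]; simp
    rw [hmap, hheadF, hlast, hxs, hys]
    simp
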